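-- pv_equiv track=rewrite | github.com/Saruwatarii/RegexEngine | regex_engine.py | reg_checker
-- ===== SOURCE A (Python) =====
-- def reg_checker(regex, string, i=0):
--     '''(str, str, int) --> bool
--         Check if regex input is matching the string input. The regex input is supported with a wildcard "."
--         The wildcard can be any character.
--         i is an incrementer for the both the regex and the string in order to check if they are matching.
--         If they are matching then increment the i(the index of the 2 strings) and contine to check the next character.
--
--         reg_checker(apple, apple, i=0):
--         < True
--         reg_checker(, a, i=0):
--         < True
--         reg_checker(.ppl., apple, i=0):
--         < True
--         reg_checker(peach, apple, i=0):
--         < False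
--     '''
--
--     #Wildcard
--     support = '.'
--     if len(regex) == 0:
--         return True
--     if len(string) == 0:
--         return False
--     if i == len(string) - 1:
--         if regex[i] == string[i] or regex[i] == support:
--             return True
--         elif len(regex) != len(string):
--             return False
--         else:
--             return False
--     if regex[i] == string[i] or regex[i] == support:
--         return reg_checker(regex, string, i=i + 1)
--     else:
--         return False
-- ===== SOURCE B (Python) =====
-- def reg_checker(regex, string, i=0):
--     # Iterative re-implementation: same guards, then one explicit loop
--     # instead of tail recursion.
--     if len(regex) == 0:
--         return True
--     if len(string) == 0:
--         return False
--     for j in range(i, len(string)):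
--         ok = regex[j] == string[j] or regex[j] == '.'
--         if not ok:
--             return False
--         if j == len(string) - 1:
--             return True
--     return False
-- ===== Notes on version B (the rewrite author's own statement) =====
-- stated objective: idiomatic
-- what changed: The tail recursion over the incrementer i is replaced by a single explicit for-loop over range(i, len(string)) with early returns; the two empty-string guards are kept.
import Mathlib
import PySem

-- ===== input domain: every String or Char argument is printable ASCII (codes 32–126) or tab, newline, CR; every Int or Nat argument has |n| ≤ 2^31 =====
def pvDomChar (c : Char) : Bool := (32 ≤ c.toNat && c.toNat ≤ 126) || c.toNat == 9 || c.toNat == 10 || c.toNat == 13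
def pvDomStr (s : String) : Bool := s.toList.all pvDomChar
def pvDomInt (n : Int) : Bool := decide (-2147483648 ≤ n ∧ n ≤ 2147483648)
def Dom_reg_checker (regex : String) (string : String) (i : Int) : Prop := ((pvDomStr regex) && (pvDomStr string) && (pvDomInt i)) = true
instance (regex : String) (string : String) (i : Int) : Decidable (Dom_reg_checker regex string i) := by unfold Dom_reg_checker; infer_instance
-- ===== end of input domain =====

-- B replaces A's tail recursion by one explicit loop over range(i, len(string)); same return value wherever A returns.

-- ===== PORT A =====
-- 'regex[i] == string[i] or regex[i] == support' ; false when an index is out of range (Python raises there, excluded by Pre_)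
def regMatchA (regex : String) (string : String) (i : Int) : Bool :=
  match PySem.Str.pyGet? regex i, PySem.Str.pyGet? string i with
  | some rc, some sc => rc == sc || rc == '.'
  | _, _ => false

def reg_checker (regex : String) (string : String) (i : Int) : Bool :=
  if PySem.Str.len regex = 0 then true
  else if PySem.Str.len string = 0 then false
  else if i = PySem.Str.len string - 1 then
    (if regMatchA regex string i then true
     else if PySem.Str.len regex ≠ PySem.Str.len string then false
     else false)
  else if hm : regMatchA regex string i = true then
    reg_checker regex string (i + 1)
  else false
termination_by (PySem.Str.len string - i).toNat
decreasing_by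
  have hsome : PySem.Str.pyGet? string i ≠ none := by
    intro hnone
    unfold regMatchA at hm
    rw [hnone] at hm
    cases h : PySem.Str.pyGet? regex i <;> rw [h] at hm <;> simp at hm
  rw [PySem.Str.pyGet?_eq, Ne, PySem.Chars.pyGet?_eq_listPyGet?, PySem.List.pyGet?_eq_none_iff] at hsome
  simp [PySem.Raise.InRange, String.length_toList] at hsome
  have hl : string.toList.length = string.length := String.length_toList
  simp only [PySem.Str.len_eq]
  omega

-- ===== PORT B =====
-- 'ok = regex[j] == string[j] or regex[j] == "."' inside B's loop; false where Python B would raise (excluded by Pre_)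
def altOk (regex : String) (string : String) (j : Int) : Bool :=
  match PySem.Str.pyGet? regex j, PySem.Str.pyGet? string j with
  | some rc, some sc => rc == sc || rc == '.'
  | _, _ => false

-- the 'for j in range(i, len(string))' loop with its three early exits; [] = loop fell through, 'return False'
def altLoop (regex : String) (string : String) : List Int → Bool
  | [] => false
  | j :: rest =>
    if !(altOk regex string j) then false
    else if j = PySem.Str.len string - 1 then true
    else altLoop regex string rest

def reg_checker_alt (regex : String) (string : String) (i : Int) : Bool :=
  if PySem.Str.len regex = 0 then true
  else if PySem.Str.len string = 0 then false
  else altLoop regex string (PySem.List.pyRange i (PySem.Str.len string) 1)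

-- ===== PRECONDITION & SPEC =====
-- Pre_ excludes exactly the inputs where Python A raises IndexError: an out-of-range start index i,
-- or a regex shorter than the string whose characters all match up to len(regex) (the recursion then reads regex[len(regex)]).
def pvPreMismatch (regex : String) (string : String) (j : Int) : Bool :=
  match PySem.Str.pyGet? regex j, PySem.Str.pyGet? string j with
  | some rc, some sc => !(rc == sc || rc == '.')
  | _, _ => false

def Pre_reg_checker (regex : String) (string : String) (i : Int) : Prop :=
  PySem.Str.len regex = 0 ∨ PySem.Str.len string = 0 ∨
    (-(PySem.Str.len string) ≤ i ∧ i < PySem.Str.len string ∧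
     -(PySem.Str.len regex) ≤ i ∧ i < PySem.Str.len regex ∧
     (PySem.Str.len string ≤ PySem.Str.len regex ∨
      (PySem.List.pyRange i (PySem.Str.len regex) 1).any (pvPreMismatch regex string)))

instance (regex : String) (string : String) (i : Int) : Decidable (Pre_reg_checker regex string i) := by
  unfold Pre_reg_checker; infer_instance

def pvWitness_reg_checker : String × String × Int := ("a.c", "abc", 0)

def Spec_reg_checker (regex : String) (string : String) (i : Int) (out : Bool) : Prop := out = reg_checker_alt regex string i
instance (regex : String) (string : String) (i : Int) (out : Bool) : Decidable (Spec_reg_checker regex string i out) := by unfold Spec_reg_checker; infer_instance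

-- ===== CLAIM (what is proved, stated in full; the proofs are below) =====
def Claim_equal_reg_checker : Prop := ∀ (regex : String) (string : String) (i : Int), Dom_reg_checker regex string i → Pre_reg_checker regex string i → Spec_reg_checker regex string i (reg_checker regex string i)

-- ===== LEMMAS AND PROOFS =====

lemma altOk_eq_regMatchA (regex string : String) (i : Int) :
    altOk regex string i = regMatchA regex string i := rfl

lemma regMatchA_out_of_range (regex string : String) (i : Int)
    (h : (string.toList.length : Int) ≤ i) : regMatchA regex string i = false := by
  unfold regMatchA
  have hnone : PySem.Str.pyGet? string i = none := by
    rw [PySem.Str.pyGet?_eq, PySem.Chars.pyGet?_eq_listPyGet?, PySem.List.pyGet?_eq_none_iff]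
    simp [PySem.Raise.InRange, String.length_toList]
    have hl : string.toList.length = string.length := String.length_toList
    omega
  rw [hnone]
  cases PySem.Str.pyGet? regex i <;> rfl

-- the core: A's recursion equals B's loop, for every input (where Python raises both ports return false)
lemma reg_checker_eq_loop (regex string : String)
    (hr : ¬ PySem.Str.len regex = 0) (hs : ¬ PySem.Str.len string = 0) :
    ∀ (k : Nat) (i : Int), (PySem.Str.len string - i).toNat = k →
      reg_checker regex string i =
        altLoop regex string (PySem.List.pyRange i (PySem.Str.len string) 1) := by
  intro k
  induction k with
  | zero =>
    intro i hk
    have hni : PySem.Str.len string ≤ i := by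
      simp only [PySem.Str.len_eq] at hk ⊢; omega
    have hn1 : ¬ i = PySem.Str.len string - 1 := by
      simp only [PySem.Str.len_eq] at hni hs ⊢; omega
    have hm : regMatchA regex string i = false := by
      apply regMatchA_out_of_range
      have hl : string.toList.length = string.length := String.length_toList
      simp only [PySem.Str.len_eq] at hni; omega
    rw [PySem.List.pyRange_one_eq_nil hni, reg_checker,
        if_neg hr, if_neg hs, if_neg hn1, dif_neg (by simp [hm])]
    rfl
  | succ k ih =>
    intro i hk
    have hi : i < PySem.Str.len string := by
      simp only [PySem.Str.len_eq] at hk ⊢; omega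
    rw [PySem.List.pyRange_one_cons hi]
    rw [reg_checker, if_neg hr, if_neg hs]
    simp only [altLoop, altOk_eq_regMatchA]
    by_cases hmv : regMatchA regex string i = true
    · by_cases hlast : i = PySem.Str.len string - 1
      · simp [hlast]
      · rw [if_neg hlast, dif_pos hmv]
        simp only [hmv, Bool.not_true, Bool.false_eq_true, if_false, if_neg hlast]
        exact ih (i + 1) (by simp only [PySem.Str.len_eq] at hk ⊢; omega)
    · have hmf : regMatchA regex string i = false := by simpa using hmv
      simp [hmf]

lemma reg_checker_eq_alt (regex string : String) (i : Int) :
    reg_checker regex string i = reg_checker_alt regex string i := by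
  by_cases hr : PySem.Str.len regex = 0
  · rw [reg_checker, reg_checker_alt, if_pos hr, if_pos hr]
  · by_cases hs : PySem.Str.len string = 0
    · rw [reg_checker, reg_checker_alt, if_neg hr, if_neg hr, if_pos hs, if_pos hs]
    · rw [reg_checker_alt, if_neg hr, if_neg hs]
      exact reg_checker_eq_loop regex string hr hs _ i rfl

-- ===== VERDICT (by name: the statement is the Claim_ definition above) =====
theorem reg_checker_spec : Claim_equal_reg_checker := by
  intro regex string i _ _
  unfold Spec_reg_checker
  exact reg_checker_eq_alt regex string i
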